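-- pv_equiv track=rewrite | github.com/gacou54/pyorthanc | pyorthanc/util.py | _make_path_name
-- ===== SOURCE A (Python) =====
-- from typing import List, Dict, Callable, Optional
--
-- def _make_path_name(name: str, directories: List[str], increment: int = 1, has_increment: bool = False) -> str:
--     if not has_increment:
--         name = f'{name}-{increment}'
--         has_increment = True
--     else:
--         name = '-'.join(name.split('-')[:-1])
--
--     if name in directories:
--         return _make_path_name(name, directories, increment + 1, has_increment)
--
--     return name
-- ===== SOURCE B (Python) =====
-- def _make_path_name(name, directories, increment=1, has_increment=False):
--     if not has_increment:
--         name = f'{name}-{increment}'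
--     else:
--         name = '-'.join(name.split('-')[:-1])
--     while name in directories:
--         name = '-'.join(name.split('-')[:-1])
--     return name
-- ===== Notes on version B (the rewrite author's own statement) =====
-- stated objective: simpler
-- what changed: Replaces A's tail recursion (which threads an increment counter and a has_increment flag through every call) with a single initial step followed by a plain while-loop on the name alone, dropping the increment parameter that A never reads after the first call.
-- outside the precondition, e.g. on _make_path_name('a', [''], 1, False): A returns 'a-1', B returns 'a-1'
import Mathlib
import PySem

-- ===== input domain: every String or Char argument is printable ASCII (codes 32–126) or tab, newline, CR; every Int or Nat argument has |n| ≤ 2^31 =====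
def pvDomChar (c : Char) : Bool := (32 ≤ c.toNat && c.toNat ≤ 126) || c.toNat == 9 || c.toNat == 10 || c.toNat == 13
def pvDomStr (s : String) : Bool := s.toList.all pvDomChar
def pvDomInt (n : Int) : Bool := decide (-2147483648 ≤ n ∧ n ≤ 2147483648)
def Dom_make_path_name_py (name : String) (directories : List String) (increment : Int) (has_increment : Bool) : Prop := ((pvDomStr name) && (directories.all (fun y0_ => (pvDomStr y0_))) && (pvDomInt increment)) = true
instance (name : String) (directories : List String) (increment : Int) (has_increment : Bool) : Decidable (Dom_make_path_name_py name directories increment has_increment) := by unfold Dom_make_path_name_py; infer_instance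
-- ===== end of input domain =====

-- B rewrites A's tail recursion as an explicit while-loop and drops the increment counter,
-- which A never reads after the first call (objective: simpler; equal return values).

-- ===== PORT A =====
-- shared helper: Python's  '-'.join(name.split('-')[:-1])   (sep "-" is nonempty, so split? is always `some`)
def pvStrip (s : String) : String :=
  PySem.Str.join "-" (PySem.List.slice ((PySem.Str.split? s "-").getD []) none (some (-1)))

-- A's recursion, fuel-guarded; under Pre_ the fuel chosen below is never exhausted
def pvGoA : Nat → String → List String → Int → Bool → String
  | 0, name, _, _, _ => name
  | fuel + 1, name, directories, increment, has_increment =>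
    let name := if !has_increment then PySem.Str.join "-" [name, PySem.Int.toStr increment]
                else pvStrip name
    if name ∈ directories then pvGoA fuel name directories (increment + 1) true
    else name

def make_path_name_py (name : String) (directories : List String) (increment : Int) (has_increment : Bool) : String :=
  pvGoA (name.toList.length + (PySem.Int.toStr increment).toList.length + 3) name directories increment has_increment

-- ===== PORT B =====
-- B's while-loop, fuel-guarded; under Pre_ the fuel chosen below is never exhausted
def pvGoB : Nat → String → List String → String
  | 0, name, _ => name
  | fuel + 1, name, directories =>
    if name ∈ directories then pvGoB fuel (pvStrip name) directories
    else name

def make_path_name_py_alt (name : String) (directories : List String) (increment : Int) (has_increment : Bool) : String :=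
  let name0 := if !has_increment then PySem.Str.join "-" [name, PySem.Int.toStr increment]
               else pvStrip name
  pvGoB (name0.toList.length + 1) name0 directories

-- ===== PRECONDITION & SPEC =====
-- Pre_ excludes directories lists containing the empty string: on those A can recurse forever
-- (RecursionError, since stripping '' yields '' again); on such lists that happen to terminate
-- A and B still agree, but the carve-out is kept as this simple closed-form condition.
def Pre_make_path_name_py (name : String) (directories : List String) (increment : Int) (has_increment : Bool) : Prop :=
  "" ∉ directories

instance (name : String) (directories : List String) (increment : Int) (has_increment : Bool) : Decidable (Pre_make_path_name_py name directories increment has_increment) := by unfold Pre_make_path_name_py; infer_instance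

def pvWitness_make_path_name_py : String × List String × Int × Bool := ("data", ["data-1", "data-2"], 1, false)

def Spec_make_path_name_py (name : String) (directories : List String) (increment : Int) (has_increment : Bool) (out : String) : Prop := out = make_path_name_py_alt name directories increment has_increment
instance (name : String) (directories : List String) (increment : Int) (has_increment : Bool) (out : String) : Decidable (Spec_make_path_name_py name directories increment has_increment out) := by unfold Spec_make_path_name_py; infer_instance

-- ===== CLAIM (what is proved, stated in full; the proofs are below) =====
def Claim_equal_make_path_name_py : Prop := ∀ (name : String) (directories : List String) (increment : Int) (has_increment : Bool), Dom_make_path_name_py name directories increment has_increment → Pre_make_path_name_py name directories increment has_increment → Spec_make_path_name_py name directories increment has_increment (make_path_name_py name directories increment has_increment)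

-- ===== LEMMAS AND PROOFS =====

-- one-step unfolding equations (used so the verdict proof can unfold exactly once)
theorem pvGoA_succ (f : Nat) (name : String) (dirs : List String) (inc : Int) (hi : Bool) :
    pvGoA (f + 1) name dirs inc hi
      = (let n := if !hi then PySem.Str.join "-" [name, PySem.Int.toStr inc] else pvStrip name;
         if n ∈ dirs then pvGoA f n dirs (inc + 1) true else n) := rfl

theorem pvGoB_succ (f : Nat) (name : String) (dirs : List String) :
    pvGoB (f + 1) name dirs
      = (if name ∈ dirs then pvGoB f (pvStrip name) dirs else name) := rfl

theorem pvSplitOn_cons (x : Char) (xs : List Char) :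
    (x :: xs).splitOn '-'
      = if x = '-' then [] :: xs.splitOn '-' else (xs.splitOn '-').modifyHead (x :: ·) := by
  simp [List.splitOn, List.splitOnP_cons]

theorem pvSplitOn_ne_nil (xs : List Char) : xs.splitOn '-' ≠ [] :=
  List.splitOnP_ne_nil _ xs

-- PySem.Chars.splitOn.go, characterised by List.splitOn (sep = ['-'])
theorem pvGo_splitOn (l : List Char) : ∀ (fuel : Nat) (cur : List Char) (acc : List (List Char)),
    l.length < fuel →
    PySem.Chars.splitOn.go ['-'] fuel l cur acc
      = acc.reverse ++ (l.splitOn '-').modifyHead (cur.reverse ++ ·) := by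
  induction l with
  | nil =>
    intro fuel cur acc h
    match fuel, h with
    | fuel + 1, _ =>
      simp [PySem.Chars.splitOn.go, List.splitOn, List.splitOnP, List.splitOnP.go,
        List.modifyHead]
  | cons c rest ih =>
    intro fuel cur acc h
    match fuel, h with
    | fuel + 1, h =>
      simp only [PySem.Chars.splitOn.go]
      by_cases hc : c = '-'
      · subst hc
        have hp : ['-'].isPrefixOf ('-' :: rest) = true := by simp [List.isPrefixOf]
        rw [if_pos hp]
        rw [show List.drop ['-'].length ('-' :: rest) = rest from rfl]
        rw [ih fuel [] ((cur.reverse) :: acc) (by simpa using h)]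
        rw [pvSplitOn_cons, if_pos rfl]
        obtain ⟨p, ps, hps⟩ := List.exists_cons_of_ne_nil (pvSplitOn_ne_nil rest)
        simp [hps, List.modifyHead]
      · have hp : ['-'].isPrefixOf (c :: rest) = false := by
          simp only [List.isPrefixOf, Bool.and_eq_false_iff]
          left
          simp [Ne.symm hc]
        rw [if_neg (by simp [hp])]
        rw [ih fuel (c :: cur) acc (by simpa using h)]
        rw [pvSplitOn_cons, if_neg hc]
        obtain ⟨p, ps, hps⟩ := List.exists_cons_of_ne_nil (pvSplitOn_ne_nil rest)
        simp [hps, List.modifyHead]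

theorem pvSplitOn_eq (cs : List Char) : PySem.Chars.splitOn cs ['-'] = cs.splitOn '-' := by
  unfold PySem.Chars.splitOn
  rw [pvGo_splitOn cs (cs.length + 1) [] [] (by omega)]
  obtain ⟨p, ps, hps⟩ := List.exists_cons_of_ne_nil (pvSplitOn_ne_nil cs)
  simp [hps, List.modifyHead]

-- dropping the last piece of a '-'-join strictly shortens a nonempty join
theorem pvJoin_dropLast_lt : ∀ (ps : List (List Char)), PySem.Chars.join ['-'] ps ≠ [] →
    (PySem.Chars.join ['-'] ps.dropLast).length < (PySem.Chars.join ['-'] ps).length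
  | [], h => by simp [PySem.Chars.join_nil] at h
  | [p], h => by
      rw [show ([p] : List (List Char)).dropLast = [] from rfl, PySem.Chars.join_nil,
        PySem.Chars.join_singleton] at *
      simpa [List.length_pos_iff] using h
  | p :: q :: rest, _ => by
      match rest with
      | [] =>
        rw [show (([p, q] : List (List Char))).dropLast = [p] from rfl,
          PySem.Chars.join_singleton, PySem.Chars.join_cons_cons, PySem.Chars.join_singleton]
        simp
      | s :: t =>
        have ih := pvJoin_dropLast_lt (q :: s :: t) (by simp [PySem.Chars.join_cons_cons])
        rw [show (p :: q :: s :: t).dropLast = p :: q :: (s :: t).dropLast from rfl] at *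
        rw [show (q :: s :: t).dropLast = q :: (s :: t).dropLast from rfl] at ih
        rw [PySem.Chars.join_cons_cons, PySem.Chars.join_cons_cons (sep := ['-']) (p := p) (q := q)]
        simp only [List.length_append]
        omega

-- the pieces of pvStrip, on the char level
theorem pvStrip_toList (s : String) :
    (pvStrip s).toList = PySem.Chars.join ['-'] ((s.toList.splitOn '-').dropLast) := by
  unfold pvStrip
  have h := PySem.Str.split?_map s "-"
  rw [show PySem.Chars.split? s.toList "-".toList
        = some (PySem.Chars.splitOn s.toList ['-']) from by simp [PySem.Chars.split?]] at h
  cases hx : PySem.Str.split? s "-" with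
  | none => rw [hx] at h; simp at h
  | some xs =>
    rw [hx] at h
    simp only [Option.map_some, Option.some.injEq] at h
    simp only [Option.getD_some, PySem.List.slice_to_neg_one, PySem.Str.toList_join]
    rw [show ("-" : String).toList = ['-'] from rfl, ← pvSplitOn_eq, ← h, List.map_dropLast]

-- stripping a nonempty string strictly shortens it
theorem pvStrip_lt (s : String) (h : s.toList ≠ []) :
    (pvStrip s).toList.length < s.toList.length := by
  rw [pvStrip_toList]
  have hcs : PySem.Chars.join ['-'] (s.toList.splitOn '-') = s.toList := by
    simpa [PySem.Chars.join] using List.intercalate_splitOn s.toList '-'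
  have := pvJoin_dropLast_lt (s.toList.splitOn '-') (by rw [hcs]; exact h)
  rw [hcs] at this
  exact this

theorem pvStrip_le (s : String) : (pvStrip s).toList.length ≤ s.toList.length := by
  by_cases h : s.toList = []
  · rw [String.toList_eq_nil_iff.mp h]
    simp [show pvStrip "" = "" from by decide]
  · exact Nat.le_of_lt (pvStrip_lt s h)

theorem pvNe_empty_of_mem {m : String} {dirs : List String} (hm : m ∈ dirs) (hp : "" ∉ dirs) :
    m.toList ≠ [] := by
  intro hnil
  exact hp (String.toList_eq_nil_iff.mp hnil ▸ hm)

-- B's loop returns the same value from any sufficient fuel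
theorem pvGoB_stable {dirs : List String} (hp : "" ∉ dirs) :
    ∀ (f1 : Nat) (m : String) (f2 : Nat), m.toList.length < f1 → m.toList.length < f2 →
    pvGoB f1 m dirs = pvGoB f2 m dirs := by
  intro f1
  induction f1 with
  | zero => intro m f2 h1 _; omega
  | succ f1 ih =>
    intro m f2 h1 h2
    match f2, h2 with
    | f2 + 1, h2 =>
      rw [pvGoB_succ, pvGoB_succ]
      by_cases hm : m ∈ dirs
      · rw [if_pos hm, if_pos hm]
        have hlt := pvStrip_lt m (pvNe_empty_of_mem hm hp)
        exact ih (pvStrip m) f2 (by omega) (by omega)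
      · rw [if_neg hm, if_neg hm]

-- A's recursion with has_increment = True is B's loop on the stripped name
theorem pvGoA_eq_goB {dirs : List String} (hp : "" ∉ dirs) :
    ∀ (f : Nat) (name : String) (inc : Int), (pvStrip name).toList.length < f →
    pvGoA (f + 1) name dirs inc true = pvGoB f (pvStrip name) dirs := by
  intro f
  induction f with
  | zero => intro name inc h; omega
  | succ f ih =>
    intro name inc h
    rw [pvGoA_succ, pvGoB_succ]
    simp only [Bool.not_true, if_neg (by simp : ¬ ((false : Bool) = true))]
    by_cases hm : pvStrip name ∈ dirs
    · rw [if_pos hm, if_pos hm]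
      have hlt := pvStrip_lt (pvStrip name) (pvNe_empty_of_mem hm hp)
      exact ih (pvStrip name) (inc + 1) (by omega)
    · rw [if_neg hm, if_neg hm]

-- ===== VERDICT (by name: the statement is the Claim_ definition above) =====
theorem make_path_name_py_spec : Claim_equal_make_path_name_py := by
  intro name dirs inc hi _ hp
  unfold Spec_make_path_name_py make_path_name_py make_path_name_py_alt
  unfold Pre_make_path_name_py at hp
  set L := name.toList.length with hL
  set Li := (PySem.Int.toStr inc).toList.length with hLi
  cases hi with
  | true =>
    have hle := pvStrip_le name
    rw [show L + Li + 3 = (L + Li + 2) + 1 from rfl]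
    rw [pvGoA_eq_goB hp (L + Li + 2) name inc (by omega)]
    simp only [Bool.not_true, if_neg (by simp : ¬ ((false : Bool) = true))]
    exact pvGoB_stable hp (L + Li + 2) (pvStrip name) ((pvStrip name).toList.length + 1)
      (by omega) (by omega)
  | false =>
    set name0 := PySem.Str.join "-" [name, PySem.Int.toStr inc] with hname0
    have hlen : name0.toList.length = L + 1 + Li := by
      rw [hname0]
      simp [PySem.Str.toList_join, PySem.Chars.join_cons_cons, PySem.Chars.join_singleton,
        hL, hLi, ← String.length_toList]
      omega
    rw [show L + Li + 3 = (L + Li + 2) + 1 from rfl]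
    rw [pvGoA_succ, pvGoB_succ]
    simp only [Bool.not_false, if_true, ← hname0]
    by_cases hm : name0 ∈ dirs
    · rw [if_pos hm, if_pos hm]
      have hlt := pvStrip_lt name0 (pvNe_empty_of_mem hm hp)
      rw [show L + Li + 2 = (L + Li + 1) + 1 from rfl]
      rw [pvGoA_eq_goB hp (L + Li + 1) name0 (inc + 1) (by omega)]
      exact pvGoB_stable hp (L + Li + 1) (pvStrip name0) name0.toList.length
        (by omega) (by omega)
    · rw [if_neg hm, if_neg hm]
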